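-- pv_equiv track=rewrite | github.com/ks-ng/ksng | old/crypto_ily/qso2.py | contract
-- ===== SOURCE A (Python) =====
-- def contract(bits: list[int]) -> list[int]:
-- 	output = []
-- 	for index, bit in list(enumerate(bits))[:-1]:
-- 		cx = 0
-- 		for b in output:
-- 			cx ^= b
-- 		for b in bits:
-- 			cx ^= b
--
-- 		output.append(bit ^ cx ^ bits[index + 1])
--
-- 	return output
-- ===== SOURCE B (Python) =====
-- def contract(bits: list[int]) -> list[int]:
--     total = 0
--     for b in bits:
--         total ^= b
--     output = []
--     outx = 0
--     for i in range(len(bits) - 1):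
--         v = bits[i] ^ outx ^ total ^ bits[i + 1]
--         output.append(v)
--         outx ^= v
--     return output
-- ===== Notes on version B (the rewrite author's own statement) =====
-- stated objective: faster
-- what changed: Precomputes the total XOR of bits once and maintains a running XOR of the output incrementally, so each step is O(1) instead of re-scanning output and bits.
import Mathlib
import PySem

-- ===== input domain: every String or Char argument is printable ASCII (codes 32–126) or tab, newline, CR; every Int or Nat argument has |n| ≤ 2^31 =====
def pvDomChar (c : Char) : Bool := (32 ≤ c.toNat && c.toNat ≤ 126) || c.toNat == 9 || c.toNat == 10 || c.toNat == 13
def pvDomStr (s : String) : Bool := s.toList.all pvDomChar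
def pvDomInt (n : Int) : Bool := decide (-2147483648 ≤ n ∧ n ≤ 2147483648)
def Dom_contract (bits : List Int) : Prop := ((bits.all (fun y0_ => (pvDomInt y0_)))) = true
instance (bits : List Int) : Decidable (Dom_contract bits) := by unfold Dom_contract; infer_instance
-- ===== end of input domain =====

-- B precomputes the total XOR of bits once and maintains a running XOR of the output,
-- replacing A's per-step rescans of output and bits (O(n^2) → O(n)).

-- ===== PORT A =====
def contract (bits : List Int) : List Int :=
  (PySem.List.slice (PySem.List.enumerate bits) none (some (-1))).foldl
    (fun output ib =>
      let cx : Int := 0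
      let cx := output.foldl (fun c b => PySem.Int.bxor c b) cx
      let cx := bits.foldl (fun c b => PySem.Int.bxor c b) cx
      output ++ [PySem.Int.bxor (PySem.Int.bxor ib.2 cx) (PySem.List.pyGetD bits (ib.1 + 1) 0)])
    []

-- ===== PORT B =====
def contract_alt (bits : List Int) : List Int :=
  let total := bits.foldl (fun t b => PySem.Int.bxor t b) 0
  ((PySem.List.pyRange 0 ((bits.length : Int) - 1) 1).foldl
    (fun (st : List Int × Int) i =>
      let v := PySem.Int.bxor (PySem.Int.bxor (PySem.Int.bxor (PySem.List.pyGetD bits i 0) st.2) total)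
                 (PySem.List.pyGetD bits (i + 1) 0)
      (st.1 ++ [v], PySem.Int.bxor st.2 v))
    ([], 0)).1

-- ===== PRECONDITION & SPEC =====
def Spec_contract (bits : List Int) (out : List Int) : Prop := out = contract_alt bits
instance (bits : List Int) (out : List Int) : Decidable (Spec_contract bits out) := by unfold Spec_contract; infer_instance

-- ===== CLAIM (what is proved, stated in full; the proofs are below) =====
def Claim_equal_contract : Prop := ∀ (bits : List Int), Dom_contract bits → Spec_contract bits (contract bits)

-- ===== LEMMAS AND PROOFS =====
theorem bxor_eq_xor (a b : Int) : PySem.Int.bxor a b = Int.xor a b := by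
  rcases a with m | m <;> rcases b with n | n <;>
    simp [PySem.Int.bxor, Int.xor, Int.negSucc_eq] <;> omega

theorem bxor_assoc (a b c : Int) :
    PySem.Int.bxor (PySem.Int.bxor a b) c = PySem.Int.bxor a (PySem.Int.bxor b c) := by
  simp only [bxor_eq_xor]
  rcases a with m | m <;> rcases b with n | n <;> rcases c with k | k <;>
    simp [Int.xor, Nat.xor_assoc]

theorem foldl_bxor_init (l : List Int) (c : Int) :
    l.foldl (fun x y => PySem.Int.bxor x y) c
      = PySem.Int.bxor c (l.foldl (fun x y => PySem.Int.bxor x y) 0) := by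
  induction l generalizing c with
  | nil => simp
  | cons x l ih =>
    simp only [List.foldl_cons]
    rw [ih (PySem.Int.bxor c x), ih (PySem.Int.bxor 0 x), bxor_assoc]
    have h0 : PySem.Int.bxor (0 : Int) x = x := by
      rw [PySem.Int.bxor_comm]; exact PySem.Int.bxor_zero x
    rw [h0]

-- the main invariant: after k steps A's output equals B's output,
-- and B's running accumulator is the XOR of that output
theorem main_inv (bits : List Int) (k : Nat) (hk : k + 1 ≤ bits.length) :
    ((PySem.List.pyRange 0 (k : Int) 1).foldl
      (fun (st : List Int × Int) i =>
        let v := PySem.Int.bxor (PySem.Int.bxor (PySem.Int.bxor (PySem.List.pyGetD bits i 0) st.2)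
                   (bits.foldl (fun t b => PySem.Int.bxor t b) 0))
                 (PySem.List.pyGetD bits (i + 1) 0)
        (st.1 ++ [v], PySem.Int.bxor st.2 v))
      ([], 0))
    = (((PySem.List.enumerate bits).take k).foldl
        (fun output ib =>
          let cx : Int := 0
          let cx := output.foldl (fun c b => PySem.Int.bxor c b) cx
          let cx := bits.foldl (fun c b => PySem.Int.bxor c b) cx
          output ++ [PySem.Int.bxor (PySem.Int.bxor ib.2 cx) (PySem.List.pyGetD bits (ib.1 + 1) 0)])
        [],
       (((PySem.List.enumerate bits).take k).foldl
        (fun output ib =>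
          let cx : Int := 0
          let cx := output.foldl (fun c b => PySem.Int.bxor c b) cx
          let cx := bits.foldl (fun c b => PySem.Int.bxor c b) cx
          output ++ [PySem.Int.bxor (PySem.Int.bxor ib.2 cx) (PySem.List.pyGetD bits (ib.1 + 1) 0)])
        []).foldl (fun x y => PySem.Int.bxor x y) 0) := by
  induction k with
  | zero => simp [PySem.List.pyRange]
  | succ k ih =>
    have hk' : k + 1 ≤ bits.length := by omega
    have hklt : k < bits.length := by omega
    have hr : PySem.List.pyRange 0 ((k + 1 : Nat) : Int) 1
        = PySem.List.pyRange 0 (k : Int) 1 ++ [(k : Int)] := by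
      have := PySem.List.pyRange_one_succ_right (a := 0) (b := (k : Int)) (by positivity)
      push_cast
      push_cast at this
      exact this
    have he : (PySem.List.enumerate bits).take (k + 1)
        = (PySem.List.enumerate bits).take k ++ [((k : Int), bits[k])] := by
      have hlen : k < (PySem.List.enumerate bits).length := by
        rw [PySem.List.length_enumerate]; exact hklt
      rw [List.take_add_one, List.getElem?_eq_getElem hlen, PySem.List.getElem_enumerate]
      simp
    rw [hr, he, List.foldl_append, List.foldl_append, ih hk']
    simp only [List.foldl_cons, List.foldl_nil]
    generalize (List.foldl
        (fun output ib =>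
          let cx : Int := 0
          let cx := output.foldl (fun c b => PySem.Int.bxor c b) cx
          let cx := bits.foldl (fun c b => PySem.Int.bxor c b) cx
          output ++ [PySem.Int.bxor (PySem.Int.bxor ib.2 cx) (PySem.List.pyGetD bits (ib.1 + 1) 0)])
        [] (List.take k (PySem.List.enumerate bits))) = out
    have hgk : PySem.List.pyGetD bits ((k : Nat) : Int) 0 = bits[k] := by
      rw [PySem.List.pyGetD_natCast]; exact List.getD_eq_getElem _ _ hklt
    have hfold : bits.foldl (fun t b => PySem.Int.bxor t b)
        (out.foldl (fun t b => PySem.Int.bxor t b) 0)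
        = PySem.Int.bxor (out.foldl (fun t b => PySem.Int.bxor t b) 0)
            (bits.foldl (fun t b => PySem.Int.bxor t b) 0) := foldl_bxor_init _ _
    have helem : PySem.Int.bxor (PySem.Int.bxor
          (PySem.Int.bxor (PySem.List.pyGetD bits ((k : Nat) : Int) 0)
            (out.foldl (fun t b => PySem.Int.bxor t b) 0))
          (bits.foldl (fun t b => PySem.Int.bxor t b) 0))
          (PySem.List.pyGetD bits (((k : Nat) : Int) + 1) 0)
        = PySem.Int.bxor (PySem.Int.bxor bits[k]
            (bits.foldl (fun t b => PySem.Int.bxor t b)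
              (out.foldl (fun t b => PySem.Int.bxor t b) 0)))
            (PySem.List.pyGetD bits (((k : Nat) : Int) + 1) 0) := by
      rw [hgk, hfold, bxor_assoc bits[k]]
    apply Prod.ext
    · simp only []
      rw [helem]
    · simp only []
      rw [List.foldl_append, List.foldl_cons, List.foldl_nil, helem]

-- ===== VERDICT (by name: the statement is the Claim_ definition above) =====
theorem contract_spec : Claim_equal_contract := by
  intro bits _
  unfold Spec_contract contract contract_alt
  cases bits with
  | nil => decide
  | cons x xs =>
    simp only []
    have hlen : 1 ≤ (x :: xs).length := by simp
    have hslice : PySem.List.slice (PySem.List.enumerate (x :: xs)) none (some (-1))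
        = (PySem.List.enumerate (x :: xs)).take ((x :: xs).length - 1) := by
      have := PySem.List.slice_to_neg_natCast (xs := PySem.List.enumerate (x :: xs)) (k := 1)
        (by omega)
      simpa [PySem.List.length_enumerate] using this
    have hb : (((x :: xs).length : Int) - 1) = (((x :: xs).length - 1 : Nat) : Int) := by
      push_cast [hlen]; ring
    rw [hslice, hb, main_inv (x :: xs) ((x :: xs).length - 1) (by omega)]
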